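-- pv_equiv track=rewrite | github.com/sacadena/adventofcode2023 | day08.py | count_simultaneous_steps
-- ===== SOURCE A (Python) =====
-- import math
-- from collections import defaultdict
--
-- def count_simultaneous_steps(instructions, graph):
--     starts_ending = 'A'
--     targets_ending = 'Z'
--     start_nodes = [
--         node for node in graph if node.endswith(starts_ending)
--     ]
--     end_nodes = [
--         node for node in graph if node.endswith(targets_ending)
--     ]
--
--     num_steps_starts_ends = defaultdict(list)
--     for start in start_nodes:
--         for end in end_nodes:
--             num_steps = count_steps(instructions, graph, start, end)
--             num_steps_starts_ends[start].append((end, num_steps))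
--
--     min_steps = []
--     for list_end_steps in num_steps_starts_ends.values():
--         min_steps.append(
--             min(list_end_steps, key=lambda x: x[1] if x[1] is not None else math.inf)
--         )
--     return math.lcm(*[x[1] for x in min_steps])
--
-- def count_steps(instructions, graph, start="AAA", end="ZZZ"):
--     current = start
--     i = 0
--     num_steps = 0
--     visited_edges = set()
--     while current != end:
--         num_steps += 1
--         previous = current
--         current = graph[previous][instructions[i]]
--         i = (i + 1) % len(instructions)
--         if (previous, current, i) in visited_edges:
--             return None
--         visited_edges.add((previous, current, i))
--     return num_steps
-- ===== SOURCE B (Python) =====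
-- import math
--
--
-- def count_simultaneous_steps(instructions, graph):
--     # One traversal per start node, stopping at the FIRST node ending in 'Z'
--     # (instead of one full traversal per (start, end) pair followed by a min).
--     result = 1
--     for start in graph:
--         if not start.endswith('A'):
--             continue
--         node, i, steps = start, 0, 0
--         seen = set()
--         while not node.endswith('Z'):
--             if (node, i) in seen:
--                 raise ValueError("no node ending in 'Z' is reachable from " + start)
--             seen.add((node, i))
--             node = graph[node][instructions[i]]
--             i = (i + 1) % len(instructions)
--             steps += 1
--         result = math.lcm(result, steps)
--     return result
-- ===== Notes on version B (the rewrite author's own statement) =====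
-- stated objective: alternative
-- what changed: Instead of simulating one full cycle-detected walk per (start, end) pair and taking a per-start min, B walks once from each start node, stops at the first node ending in 'Z', and folds lcm as it goes (fewer traversals when several end nodes exist; not measurably faster on the generated inputs).
-- outside the precondition, e.g. on count_simultaneous_steps('L', {'XA': {'L': 'XA'}}): A returns 1, B raises ValueError; on count_simultaneous_steps('L', {'XA': {'L': 'ZZ'}, 'ZZ': {'L': 'ZZ'}, 'QQ': {}}): A returns 1, B returns 1
import Mathlib
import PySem

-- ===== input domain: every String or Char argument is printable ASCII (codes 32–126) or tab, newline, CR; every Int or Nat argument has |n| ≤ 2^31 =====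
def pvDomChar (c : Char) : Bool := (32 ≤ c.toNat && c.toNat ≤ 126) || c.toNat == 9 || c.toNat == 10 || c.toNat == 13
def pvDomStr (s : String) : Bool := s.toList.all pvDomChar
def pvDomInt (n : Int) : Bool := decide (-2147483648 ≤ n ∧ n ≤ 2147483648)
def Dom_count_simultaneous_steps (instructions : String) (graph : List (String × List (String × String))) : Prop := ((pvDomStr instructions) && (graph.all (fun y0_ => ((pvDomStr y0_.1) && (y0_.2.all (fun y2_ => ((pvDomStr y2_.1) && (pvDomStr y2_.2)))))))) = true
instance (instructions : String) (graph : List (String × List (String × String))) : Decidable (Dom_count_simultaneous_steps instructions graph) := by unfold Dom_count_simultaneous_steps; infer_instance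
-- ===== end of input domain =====

-- B replaces A's per-(start,end) cycle-detected walks plus per-start min by ONE walk per start node that
-- stops at the first node ending in 'Z'; equivalence of the return values is proved on Pre_.

-- The Python dict argument, decoded to a PySem.Dict (shared input decoding, used by both ports and Pre_).
def pvGraph (graph : List (String × List (String × String))) : PySem.Dict String (PySem.Dict String String) :=
  PySem.Dict.ofList (graph.map (fun p => (p.1, PySem.Dict.ofList p.2)))

-- ===== PORT A =====
def pvOptLt : Option Int → Option Int → Bool
  | some a, some b => a < b
  | some _, none => true
  | none, _ => false

-- min(list_end_steps, key=lambda x: x[1] if x[1] is not None else math.inf): first minimal element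
def pyMinBySteps : List (String × Option Int) → (String × Option Int)
  | [] => ("", none)   -- Python's min raises on []; unreachable under Pre_
  | x :: xs => xs.foldl (fun best y => if pvOptLt y.2 best.2 then y else best) x

-- the while loop of count_steps; fuel only makes it total (inside Pre_ the loop always returns earlier)
def countStepsLoop (ins : List Char) (g : PySem.Dict String (PySem.Dict String String)) (endNode : String) :
    Nat → String → Int → Int → PySem.Set (String × String × Int) → Option Int
  | 0, _, _, _, _ => none
  | fuel+1, current, i, numSteps, visited =>
    if current == endNode then some numSteps
    else
      let previous := current
      let key : String := match PySem.List.pyGet? ins i with | some c => String.singleton c | none => ""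
      let current' := (g.getD previous PySem.Dict.empty).getD key ""   -- graph[previous][instructions[i]]; "" = junk where Python raises (outside Pre_)
      let i' := PySem.Int.mod (i + 1) (ins.length : Int)
      if PySem.Set.contains visited (previous, current', i') then none
      else countStepsLoop ins g endNode fuel current' i' (numSteps + 1) (PySem.Set.add visited (previous, current', i'))

def count_steps (ins : List Char) (g : PySem.Dict String (PySem.Dict String String)) (start endNode : String) : Option Int :=
  countStepsLoop ins g endNode (g.size * ins.length + 2) start 0 0 PySem.Set.empty

def count_simultaneous_steps (instructions : String) (graph : List (String × List (String × String))) : Int :=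
  let ins := instructions.toList
  let g := pvGraph graph
  let startNodes := g.keys.filter (fun node => PySem.Str.endswith node "A")
  let endNodes := g.keys.filter (fun node => PySem.Str.endswith node "Z")
  let d : PySem.Dict String (List (String × Option Int)) :=
    startNodes.foldl (fun d start =>
      endNodes.foldl (fun d e =>
        d.modify start [] (fun l => l ++ [(e, count_steps ins g start e)])) d) PySem.Dict.empty
  let minSteps : List (String × Option Int) :=
    d.values.foldl (fun acc l => acc ++ [pyMinBySteps l]) []
  (minSteps.map (fun x => x.2)).foldl (fun acc v => ((Int.lcm acc (v.getD 0) : Nat) : Int)) 1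

-- ===== PORT B =====
-- the while loop of B: walk until the current node ends in 'Z'; none = junk where Python raises (outside Pre_)
def walkLoop (ins : List Char) (g : PySem.Dict String (PySem.Dict String String)) :
    Nat → String → Int → Int → PySem.Set (String × Int) → Option Int
  | 0, _, _, _, _ => none
  | fuel+1, node, i, steps, seen =>
    if PySem.Str.endswith node "Z" then some steps
    else if PySem.Set.contains seen (node, i) then none
    else
      let key : String := match PySem.List.pyGet? ins i with | some c => String.singleton c | none => ""
      walkLoop ins g fuel ((g.getD node PySem.Dict.empty).getD key "")
        (PySem.Int.mod (i + 1) (ins.length : Int)) (steps + 1) (PySem.Set.add seen (node, i))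

def count_simultaneous_steps_alt (instructions : String) (graph : List (String × List (String × String))) : Int :=
  let ins := instructions.toList
  let g := pvGraph graph
  g.keys.foldl (fun result start =>
    if PySem.Str.endswith start "A" then
      ((Int.lcm result ((walkLoop ins g (g.size * ins.length + 2) start 0 0 PySem.Set.empty).getD 1) : Nat) : Int)
    else result) 1

-- ===== PRECONDITION & SPEC =====
-- one deterministic step of the walk (used only by Pre_ and the proofs; the index component stays < ins.length)
def pvStep (ins : List Char) (g : PySem.Dict String (PySem.Dict String String)) (st : String × Nat) : String × Nat :=
  ((g.getD st.1 PySem.Dict.empty).getD (match ins[st.2]? with | some c => String.singleton c | none => "") "",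
   (st.2 + 1) % ins.length)

-- Pre_ excludes inputs on which A raises (KeyError on a missing move or node, IndexError on empty instructions,
-- TypeError feeding None to math.lcm when some start reaches no 'Z'-node); for simplicity it requires every node's
-- moves to be defined and in the graph GLOBALLY, so it also excludes some inputs whose defective nodes are
-- unreachable (there A and B agree), and it excludes inputs with start nodes but no node ending in 'Z' (A returns
-- 1 there, B raises ValueError).
def Pre_count_simultaneous_steps (instructions : String) (graph : List (String × List (String × String))) : Prop :=
  (pvGraph graph).keys.filter (fun node => PySem.Str.endswith node "A") = [] ∨
    (instructions.toList ≠ [] ∧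
     (∀ p ∈ (pvGraph graph).items, ∀ c ∈ instructions.toList,
        ((p.2.get? (String.singleton c)).any (fun v => (pvGraph graph).contains v)) = true) ∧
     (∀ s ∈ (pvGraph graph).keys.filter (fun node => PySem.Str.endswith node "A"),
        ∃ n ∈ List.range ((pvGraph graph).keys.length * instructions.toList.length + 1),
          PySem.Str.endswith ((pvStep instructions.toList (pvGraph graph))^[n] (s, 0)).1 "Z" = true))
instance (instructions : String) (graph : List (String × List (String × String))) : Decidable (Pre_count_simultaneous_steps instructions graph) := by unfold Pre_count_simultaneous_steps; infer_instance

def pvWitness_count_simultaneous_steps : String × (List (String × List (String × String))) :=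
  ("L", [("BB", [("L", "BB")])])

def Spec_count_simultaneous_steps (instructions : String) (graph : List (String × List (String × String))) (out : Int) : Prop := out = count_simultaneous_steps_alt instructions graph
instance (instructions : String) (graph : List (String × List (String × String))) (out : Int) : Decidable (Spec_count_simultaneous_steps instructions graph out) := by unfold Spec_count_simultaneous_steps; infer_instance

-- ===== CLAIM (what is proved, stated in full; the proofs are below) =====
def Claim_equal_count_simultaneous_steps : Prop := ∀ (instructions : String) (graph : List (String × List (String × String))), Dom_count_simultaneous_steps instructions graph → Pre_count_simultaneous_steps instructions graph → Spec_count_simultaneous_steps instructions graph (count_simultaneous_steps instructions graph)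

-- ===== LEMMAS AND PROOFS =====
lemma pvShift {α : Type} (f : α → α) (x : α) {s t : Nat} (h : f^[s] x = f^[t] x) (k : Nat) :
    f^[s + k] x = f^[t + k] x := by
  rw [Nat.add_comm s k, Nat.add_comm t k, Function.iterate_add_apply, Function.iterate_add_apply, h]

lemma pvNoRepeat {α : Type} (f : α → α) (x : α) (Q : α → Prop) (n : Nat)
    (hmin : ∀ m < n, ¬ Q (f^[m] x)) (hn : Q (f^[n] x)) {s t : Nat} (hst : s < t) (htn : t ≤ n) :
    f^[s] x ≠ f^[t] x := by
  intro h
  have h2 := pvShift f x h (n - t)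
  rw [Nat.add_sub_cancel' htn] at h2
  exact hmin (s + (n - t)) (by omega) (h2 ▸ hn)

lemma pvEarlyHit {α : Type} (f : α → α) (x : α) (Q : α → Prop) {s t : Nat} (hst : s < t)
    (hrep : f^[s] x = f^[t] x) : ∀ n, Q (f^[n] x) → ∃ m < t, Q (f^[m] x) := by
  intro n
  induction n using Nat.strong_induction_on with
  | _ n ih =>
    intro hQ
    by_cases hlt : n < t
    · exact ⟨n, hlt, hQ⟩
    · have h2 := pvShift f x hrep (n - t)
      rw [Nat.add_sub_cancel' (by omega : t ≤ n)] at h2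
      exact ih (s + (n - t)) (by omega) (h2 ▸ hQ)

-- trajectory of the walk from a start node (proof-side abbreviation)
def pvSt (ins : List Char) (g : PySem.Dict String (PySem.Dict String String)) (s : String) (n : Nat) :
    String × Nat := (pvStep ins g)^[n] (s, 0)

lemma pvSt_snd (ins : List Char) (g : PySem.Dict String (PySem.Dict String String))
    (s : String) (n : Nat) : (pvSt ins g s n).2 = n % ins.length := by
  induction n with
  | zero => simp [pvSt]
  | succ n ih =>
    show ((pvStep ins g)^[n+1] (s, 0)).2 = _
    rw [Function.iterate_succ_apply']
    show ((pvStep ins g ((pvStep ins g)^[n] (s, 0)))).2 = _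
    simp only [pvStep]
    rw [show ((pvStep ins g)^[n] (s, 0)).2 = (pvSt ins g s n).2 from rfl, ih, Nat.mod_add_mod]

lemma pvSt_fst_mem (ins : List Char) (g : PySem.Dict String (PySem.Dict String String))
    (hins : ins ≠ [])
    (hclo : ∀ p ∈ g.items, ∀ c ∈ ins, ((p.2.get? (String.singleton c)).any (fun v => g.contains v)) = true)
    (s : String) (hs : s ∈ g.keys) (n : Nat) : (pvSt ins g s n).1 ∈ g.keys := by
  induction n with
  | zero => simpa [pvSt] using hs
  | succ n ih =>
    have h2 : (pvSt ins g s n).2 = n % ins.length := pvSt_snd ins g s n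
    have hL : 0 < ins.length := List.length_pos_of_ne_nil hins
    have hlt : (pvSt ins g s n).2 < ins.length := h2 ▸ Nat.mod_lt _ hL
    have hget : ins[(pvSt ins g s n).2]? = some (ins[(pvSt ins g s n).2]) := List.getElem?_eq_getElem hlt
    have hcon : g.contains (pvSt ins g s n).1 = true := (PySem.Dict.contains_iff_mem_keys ..).mpr ih
    rw [PySem.Dict.contains_eq_isSome_get?] at hcon
    obtain ⟨d, hd⟩ := Option.isSome_iff_exists.mp hcon
    have hmem := PySem.Dict.mem_items_of_get?_eq_some g hd
    have hcin : ins[(pvSt ins g s n).2] ∈ ins := List.getElem_mem hlt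
    have hany := hclo _ hmem _ hcin
    obtain ⟨v, hv, hvc⟩ := (Option.any_eq_true _ _).mp hany
    show ((pvStep ins g)^[n+1] (s, 0)).1 ∈ _
    rw [Function.iterate_succ_apply']
    show (pvStep ins g (pvSt ins g s n)).1 ∈ g.keys
    simp only [pvStep]
    rw [PySem.Dict.getD_of_get?_eq_some g _ hd, hget]
    simp only []
    rw [PySem.Dict.getD_of_get?_eq_some d _ hv]
    exact (PySem.Dict.contains_iff_mem_keys ..).mp hvc

lemma pvRepeatExists (ins : List Char) (g : PySem.Dict String (PySem.Dict String String))
    (hins : ins ≠ [])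
    (hclo : ∀ p ∈ g.items, ∀ c ∈ ins, ((p.2.get? (String.singleton c)).any (fun v => g.contains v)) = true)
    (s : String) (hs : s ∈ g.keys) :
    ∃ a b, a < b ∧ b ≤ g.keys.length * ins.length ∧ pvSt ins g s a = pvSt ins g s b := by
  classical
  have hL : 0 < ins.length := List.length_pos_of_ne_nil hins
  have hmaps : ∀ m ∈ Finset.range (g.keys.length * ins.length + 1),
      pvSt ins g s m ∈ g.keys.toFinset ×ˢ Finset.range ins.length := by
    intro m _
    refine Finset.mem_product.mpr ⟨List.mem_toFinset.mpr (pvSt_fst_mem ins g hins hclo s hs m), Finset.mem_range.mpr ?_⟩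
    rw [pvSt_snd]
    exact Nat.mod_lt _ hL
  have hcard : (g.keys.toFinset ×ˢ Finset.range ins.length).card < (Finset.range (g.keys.length * ins.length + 1)).card := by
    rw [Finset.card_product, Finset.card_range, Finset.card_range]
    have := List.toFinset_card_le g.keys
    calc g.keys.toFinset.card * ins.length ≤ g.keys.length * ins.length :=
          Nat.mul_le_mul_right _ this
      _ < g.keys.length * ins.length + 1 := Nat.lt_succ_self _
  obtain ⟨a, ha, b, hb, hne, heq⟩ :=
    Finset.exists_ne_map_eq_of_card_lt_of_maps_to hcard hmaps
  have ha' := Finset.mem_range.mp ha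
  have hb' := Finset.mem_range.mp hb
  rcases Nat.lt_or_ge a b with h | h
  · exact ⟨a, b, h, by omega, heq⟩
  · exact ⟨b, a, by omega, by omega, heq.symm⟩



lemma pvHitBound (ins : List Char) (g : PySem.Dict String (PySem.Dict String String))
    (hins : ins ≠ [])
    (hclo : ∀ p ∈ g.items, ∀ c ∈ ins, ((p.2.get? (String.singleton c)).any (fun v => g.contains v)) = true)
    (s : String) (hs : s ∈ g.keys) (Q : String × Nat → Prop) (n : Nat) (hQ : Q (pvSt ins g s n)) :
    ∃ m ≤ g.keys.length * ins.length, Q (pvSt ins g s m) := by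
  obtain ⟨a, b, hab, hb, heq⟩ := pvRepeatExists ins g hins hclo s hs
  obtain ⟨m, hm, hQm⟩ := pvEarlyHit (pvStep ins g) (s, 0) (fun st => Q st) hab heq n hQ
  exact ⟨m, by omega, hQm⟩

lemma pvModCast (m L : Nat) : PySem.Int.mod (((m % L : Nat) : Int) + 1) (L : Int) = (((m + 1) % L : Nat) : Int) := by
  have h1 : ((m % L : Nat) : Int) + 1 = (((m % L) + 1 : Nat) : Int) := by push_cast; ring
  rw [h1, PySem.Int.mod_natCast, Nat.mod_add_mod]

lemma pvKeyStep (ins : List Char) (g : PySem.Dict String (PySem.Dict String String))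
    (hins : ins ≠ []) (s : String) (m : Nat) :
    ((g.getD (pvSt ins g s m).1 PySem.Dict.empty).getD
      (match PySem.List.pyGet? ins (((m % ins.length : Nat) : Int)) with
       | some c => String.singleton c | none => "") "") = (pvSt ins g s (m + 1)).1 := by
  have hL : 0 < ins.length := List.length_pos_of_ne_nil hins
  have h2 : (pvSt ins g s m).2 = m % ins.length := pvSt_snd ins g s m
  have hlt : m % ins.length < ins.length := Nat.mod_lt _ hL
  rw [PySem.List.pyGet?_natCast, show pvSt ins g s (m+1) = pvStep ins g (pvSt ins g s m) from Function.iterate_succ_apply' .. , pvStep, ← h2]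


lemma pvSt_eq_of_parts (ins : List Char) (g : PySem.Dict String (PySem.Dict String String))
    (s : String) {j m : Nat}
    (h1 : (pvSt ins g s j).1 = (pvSt ins g s m).1)
    (h2 : j % ins.length = m % ins.length) : pvSt ins g s j = pvSt ins g s m := by
  have hj := pvSt_snd ins g s j
  have hm := pvSt_snd ins g s m
  exact Prod.ext h1 (by rw [hj, hm, h2])

lemma walkLoop_correct (ins : List Char) (g : PySem.Dict String (PySem.Dict String String))
    (hins : ins ≠ [])
    (s : String) (N : Nat)
    (hNZ : PySem.Str.endswith (pvSt ins g s N).1 "Z" = true)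
    (hNmin : ∀ m < N, ¬ PySem.Str.endswith (pvSt ins g s m).1 "Z" = true) :
    ∀ (fuel m : Nat) (seen : PySem.Set (String × Int)), m ≤ N → N < m + fuel →
    (∀ p, p ∈ seen ↔ ∃ j < m, p = ((pvSt ins g s j).1, ((j % ins.length : Nat) : Int))) →
    walkLoop ins g fuel (pvSt ins g s m).1 ((m % ins.length : Nat) : Int) (m : Int) seen
      = some (N : Int) := by
  intro fuel
  induction fuel with
  | zero => intro m seen h1 h2 _; omega
  | succ fuel ih =>
    intro m seen hmN hfuel hseen
    rw [walkLoop]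
    by_cases hm : m = N
    · subst hm; rw [hNZ]; simp
    · have hmlt : m < N := by omega
      rw [Bool.eq_false_iff.mpr (hNmin m hmlt)]
      simp only [Bool.false_eq_true, if_false]
      have hnotin : PySem.Set.contains seen ((pvSt ins g s m).1, ((m % ins.length : Nat) : Int)) = false := by
        rw [Bool.eq_false_iff]
        intro hc
        obtain ⟨j, hj, hp⟩ := (hseen _).mp ((PySem.Set.contains_iff ..).mp hc)
        obtain ⟨e1, e2⟩ := Prod.mk.inj hp
        have h1 : (pvSt ins g s j).1 = (pvSt ins g s m).1 := e1.symm
        have h2 : j % ins.length = m % ins.length := by exact_mod_cast e2.symm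
        exact pvNoRepeat (pvStep ins g) (s, 0)
          (fun st => PySem.Str.endswith st.1 "Z" = true) N hNmin hNZ hj (by omega)
          (pvSt_eq_of_parts ins g s h1 h2)
      rw [hnotin]
      simp only [Bool.false_eq_true, if_false]
      rw [pvKeyStep ins g hins s m, pvModCast]
      have hstep : ((m : Int) + 1) = ((m + 1 : Nat) : Int) := by push_cast; ring
      rw [hstep]
      apply ih (m + 1) _ (by omega) (by omega)
      intro p
      rw [PySem.Set.mem_add]
      constructor
      · rintro (hp | hp)
        · obtain ⟨j, hj, hpe⟩ := (hseen p).mp hp; exact ⟨j, by omega, hpe⟩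
        · exact ⟨m, by omega, hp⟩
      · rintro ⟨j, hj, hpe⟩
        by_cases hjm : j = m
        · right; rw [hpe, hjm]
        · left; exact (hseen p).mpr ⟨j, by omega, hpe⟩


lemma pvModSuccInj {a b L : Nat} (hL : 0 < L) (h : (a + 1) % L = (b + 1) % L) : a % L = b % L := by
  have h' : (a % L + 1) % L = (b % L + 1) % L := by rw [Nat.mod_add_mod, Nat.mod_add_mod]; exact h
  have ha : a % L < L := Nat.mod_lt _ hL
  have hb : b % L < L := Nat.mod_lt _ hL
  by_cases h1 : a % L + 1 < L <;> by_cases h2 : b % L + 1 < L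
  · rw [Nat.mod_eq_of_lt h1, Nat.mod_eq_of_lt h2] at h'; omega
  · rw [Nat.mod_eq_of_lt h1, show b % L + 1 = L by omega, Nat.mod_self] at h'; omega
  · rw [Nat.mod_eq_of_lt h2, show a % L + 1 = L by omega, Nat.mod_self] at h'; omega
  · omega

-- the edge recorded by A's visited set at iteration j
def pvEdge (ins : List Char) (g : PySem.Dict String (PySem.Dict String String)) (s : String)
    (j : Nat) : String × String × Int :=
  ((pvSt ins g s j).1, (pvSt ins g s (j + 1)).1, (((j + 1) % ins.length : Nat) : Int))

lemma pvEdge_inj (ins : List Char) (g : PySem.Dict String (PySem.Dict String String))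
    (hins : ins ≠ []) (s : String) {j m : Nat}
    (h : pvEdge ins g s j = pvEdge ins g s m) : pvSt ins g s j = pvSt ins g s m := by
  have hL : 0 < ins.length := List.length_pos_of_ne_nil hins
  obtain ⟨e1, e23⟩ := Prod.mk.inj h
  obtain ⟨_, e3⟩ := Prod.mk.inj e23
  have e3' : (j + 1) % ins.length = (m + 1) % ins.length := by exact_mod_cast e3
  exact pvSt_eq_of_parts ins g s e1 (pvModSuccInj hL e3')

lemma pvEdge_of_st_eq (ins : List Char) (g : PySem.Dict String (PySem.Dict String String))
    (s : String) {j m : Nat} (h : pvSt ins g s j = pvSt ins g s m)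
    (h2 : j % ins.length = m % ins.length) : pvEdge ins g s j = pvEdge ins g s m := by
  unfold pvEdge
  have hstep : pvSt ins g s (j + 1) = pvSt ins g s (m + 1) := by
    show (pvStep ins g)^[j+1] (s,0) = (pvStep ins g)^[m+1] (s,0)
    rw [Function.iterate_succ_apply', Function.iterate_succ_apply']
    exact congrArg _ h
  have e3 : (j + 1) % ins.length = (m + 1) % ins.length := by
    rw [← Nat.mod_add_mod, h2, Nat.mod_add_mod]
  rw [h, hstep, e3]

lemma countStepsLoop_hit (ins : List Char) (g : PySem.Dict String (PySem.Dict String String))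
    (hins : ins ≠ []) (s : String) (e : String) (M : Nat)
    (hM : (pvSt ins g s M).1 = e) (hmin : ∀ m < M, (pvSt ins g s m).1 ≠ e) :
    ∀ (fuel m : Nat) (visited : PySem.Set (String × String × Int)), m ≤ M → M < m + fuel →
    (∀ p, p ∈ visited ↔ ∃ j < m, p = pvEdge ins g s j) →
    countStepsLoop ins g e fuel (pvSt ins g s m).1 ((m % ins.length : Nat) : Int) (m : Int) visited
      = some (M : Int) := by
  intro fuel
  induction fuel with
  | zero => intro m _ h1 h2 _; omega
  | succ fuel ih =>
    intro m visited hmM hfuel hvis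
    rw [countStepsLoop]
    by_cases hm : m = M
    · subst hm; rw [hM]; simp
    · have hmlt : m < M := by omega
      rw [show ((pvSt ins g s m).1 == e) = false from beq_eq_false_iff_ne.mpr (hmin m hmlt)]
      simp only [Bool.false_eq_true, if_false]
      rw [pvKeyStep ins g hins s m, pvModCast]
      have hnotin : PySem.Set.contains visited (pvEdge ins g s m) = false := by
        rw [Bool.eq_false_iff]
        intro hc
        obtain ⟨j, hj, hp⟩ := (hvis _).mp ((PySem.Set.contains_iff ..).mp hc)
        exact pvNoRepeat (pvStep ins g) (s, 0) (fun st => st.1 = e) M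
          (fun m' hm' => hmin m' hm') hM hj (by omega)
          (pvEdge_inj ins g hins s hp.symm)
      rw [show PySem.Set.contains visited ((pvSt ins g s m).1, (pvSt ins g s (m+1)).1,
            (((m + 1) % ins.length : Nat) : Int)) = false from hnotin]
      simp only [Bool.false_eq_true, if_false]
      have hstep : ((m : Int) + 1) = ((m + 1 : Nat) : Int) := by push_cast; ring
      rw [hstep]
      apply ih (m + 1) _ (by omega) (by omega)
      intro p
      rw [show PySem.Set.add visited ((pvSt ins g s m).1, (pvSt ins g s (m+1)).1,
            (((m + 1) % ins.length : Nat) : Int)) = PySem.Set.add visited (pvEdge ins g s m) from rfl,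
          PySem.Set.mem_add]
      constructor
      · rintro (hp | hp)
        · obtain ⟨j, hj, hpe⟩ := (hvis p).mp hp; exact ⟨j, by omega, hpe⟩
        · exact ⟨m, by omega, hp⟩
      · rintro ⟨j, hj, hpe⟩
        by_cases hjm : j = m
        · right; rw [hpe, hjm]
        · left; exact (hvis p).mpr ⟨j, by omega, hpe⟩

lemma countStepsLoop_nohit (ins : List Char) (g : PySem.Dict String (PySem.Dict String String))
    (hins : ins ≠ []) (s : String) (e : String)
    (hno : ∀ n, (pvSt ins g s n).1 ≠ e) (R : Nat)
    (hR : ∃ a < R, pvSt ins g s a = pvSt ins g s R)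
    (hRmin : ∀ t < R, ¬ ∃ a < t, pvSt ins g s a = pvSt ins g s t) :
    ∀ (fuel m : Nat) (visited : PySem.Set (String × String × Int)), m ≤ R → R < m + fuel →
    (∀ p, p ∈ visited ↔ ∃ j < m, p = pvEdge ins g s j) →
    countStepsLoop ins g e fuel (pvSt ins g s m).1 ((m % ins.length : Nat) : Int) (m : Int) visited
      = none := by
  intro fuel
  induction fuel with
  | zero => intro m _ h1 h2 _; omega
  | succ fuel ih =>
    intro m visited hmR hfuel hvis
    rw [countStepsLoop]
    rw [show ((pvSt ins g s m).1 == e) = false from beq_eq_false_iff_ne.mpr (hno m)]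
    simp only [Bool.false_eq_true, if_false]
    rw [pvKeyStep ins g hins s m, pvModCast]
    by_cases hm : m = R
    · subst hm
      obtain ⟨a, ha, heq⟩ := hR
      have hmod : a % ins.length = m % ins.length := by
        have h1 := pvSt_snd ins g s a
        have h2 := pvSt_snd ins g s m
        rw [← h1, ← h2, heq]
      have hedge : pvEdge ins g s m = pvEdge ins g s a :=
        (pvEdge_of_st_eq ins g s heq hmod).symm
      have hin : PySem.Set.contains visited (pvEdge ins g s m) = true := by
        rw [PySem.Set.contains_iff]
        exact (hvis _).mpr ⟨a, ha, hedge⟩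
      rw [show PySem.Set.contains visited ((pvSt ins g s m).1, (pvSt ins g s (m+1)).1,
            (((m + 1) % ins.length : Nat) : Int)) = true from hin]
      simp
    · have hmlt : m < R := by omega
      have hnotin : PySem.Set.contains visited (pvEdge ins g s m) = false := by
        rw [Bool.eq_false_iff]
        intro hc
        obtain ⟨j, hj, hp⟩ := (hvis _).mp ((PySem.Set.contains_iff ..).mp hc)
        exact hRmin m hmlt ⟨j, hj, pvEdge_inj ins g hins s hp.symm⟩
      rw [show PySem.Set.contains visited ((pvSt ins g s m).1, (pvSt ins g s (m+1)).1,
            (((m + 1) % ins.length : Nat) : Int)) = false from hnotin]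
      simp only [Bool.false_eq_true, if_false]
      have hstep : ((m : Int) + 1) = ((m + 1 : Nat) : Int) := by push_cast; ring
      rw [hstep]
      apply ih (m + 1) _ (by omega) (by omega)
      intro p
      rw [show PySem.Set.add visited ((pvSt ins g s m).1, (pvSt ins g s (m+1)).1,
            (((m + 1) % ins.length : Nat) : Int)) = PySem.Set.add visited (pvEdge ins g s m) from rfl,
          PySem.Set.mem_add]
      constructor
      · rintro (hp | hp)
        · obtain ⟨j, hj, hpe⟩ := (hvis p).mp hp; exact ⟨j, by omega, hpe⟩
        · exact ⟨m, by omega, hp⟩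
      · rintro ⟨j, hj, hpe⟩
        by_cases hjm : j = m
        · right; rw [hpe, hjm]
        · left; exact (hvis p).mpr ⟨j, by omega, hpe⟩


lemma pvSizeEq (g : PySem.Dict String (PySem.Dict String String)) : g.size = g.keys.length := by
  simp [PySem.Dict.size, PySem.Dict.keys]

lemma count_steps_some (ins : List Char) (g : PySem.Dict String (PySem.Dict String String))
    (hins : ins ≠ [])
    (hclo : ∀ p ∈ g.items, ∀ c ∈ ins, ((p.2.get? (String.singleton c)).any (fun v => g.contains v)) = true)
    (s : String) (hs : s ∈ g.keys) (e : String) (hex : ∃ n, (pvSt ins g s n).1 = e) :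
    count_steps ins g s e = some ((Nat.find hex : Nat) : Int) := by
  obtain ⟨m0, hm0, hQ⟩ := pvHitBound ins g hins hclo s hs (fun st => st.1 = e) _ (Nat.find_spec hex)
  have hMle : Nat.find hex ≤ g.keys.length * ins.length := le_trans (Nat.find_min' hex hQ) hm0
  have h := countStepsLoop_hit ins g hins s e (Nat.find hex) (Nat.find_spec hex)
    (fun m hm => Nat.find_min hex hm) (g.size * ins.length + 2) 0 PySem.Set.empty
    (by omega) (by rw [pvSizeEq]; omega) (fun p => by simp [PySem.Set.empty])
  simpa [count_steps, pvSt] using h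

lemma count_steps_none (ins : List Char) (g : PySem.Dict String (PySem.Dict String String))
    (hins : ins ≠ [])
    (hclo : ∀ p ∈ g.items, ∀ c ∈ ins, ((p.2.get? (String.singleton c)).any (fun v => g.contains v)) = true)
    (s : String) (hs : s ∈ g.keys) (e : String) (hno : ∀ n, (pvSt ins g s n).1 ≠ e) :
    count_steps ins g s e = none := by
  have hexR : ∃ t, ∃ a < t, pvSt ins g s a = pvSt ins g s t := by
    obtain ⟨a, b, hab, hb, heq⟩ := pvRepeatExists ins g hins hclo s hs
    exact ⟨b, a, hab, heq⟩
  have hRle : Nat.find hexR ≤ g.keys.length * ins.length := by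
    obtain ⟨a, b, hab, hb, heq⟩ := pvRepeatExists ins g hins hclo s hs
    exact le_trans (Nat.find_min' hexR ⟨a, hab, heq⟩) hb
  have h := countStepsLoop_nohit ins g hins s e hno (Nat.find hexR) (Nat.find_spec hexR)
    (fun t ht => Nat.find_min hexR ht) (g.size * ins.length + 2) 0 PySem.Set.empty
    (by omega) (by rw [pvSizeEq]; omega) (fun p => by simp [PySem.Set.empty])
  simpa [count_steps, pvSt] using h

lemma walk_some (ins : List Char) (g : PySem.Dict String (PySem.Dict String String))
    (hins : ins ≠ [])
    (hclo : ∀ p ∈ g.items, ∀ c ∈ ins, ((p.2.get? (String.singleton c)).any (fun v => g.contains v)) = true)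
    (s : String) (hs : s ∈ g.keys)
    (hex : ∃ n, PySem.Str.endswith (pvSt ins g s n).1 "Z" = true) :
    walkLoop ins g (g.size * ins.length + 2) s 0 0 PySem.Set.empty
      = some ((Nat.find hex : Nat) : Int) := by
  obtain ⟨m0, hm0, hQ⟩ := pvHitBound ins g hins hclo s hs
    (fun st => PySem.Str.endswith st.1 "Z" = true) _ (Nat.find_spec hex)
  have hNle : Nat.find hex ≤ g.keys.length * ins.length := le_trans (Nat.find_min' hex hQ) hm0
  have h := walkLoop_correct ins g hins s (Nat.find hex) (Nat.find_spec hex)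
    (fun m hm => Nat.find_min hex hm) (g.size * ins.length + 2) 0 PySem.Set.empty
    (by omega) (by rw [pvSizeEq]; omega) (fun p => by simp [PySem.Set.empty])
  simpa [pvSt] using h

lemma pvOptLt_irrefl (a : Option Int) : pvOptLt a a = false := by
  cases a <;> simp [pvOptLt]

lemma pvOptLt_neg_trans {a b c : Option Int} (h1 : pvOptLt a b = false) (h2 : pvOptLt b c = false) :
    pvOptLt a c = false := by
  cases a <;> cases b <;> cases c <;> simp_all [pvOptLt] <;> omega

lemma pvFold_spec (xs : List (String × Option Int)) :
    ∀ x, (xs.foldl (fun best y => if pvOptLt y.2 best.2 then y else best) x = x ∨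
          xs.foldl (fun best y => if pvOptLt y.2 best.2 then y else best) x ∈ xs) ∧
      pvOptLt x.2 (xs.foldl (fun best y => if pvOptLt y.2 best.2 then y else best) x).2 = false ∧
      ∀ y ∈ xs, pvOptLt y.2 (xs.foldl (fun best y => if pvOptLt y.2 best.2 then y else best) x).2 = false := by
  induction xs with
  | nil => intro x; exact ⟨Or.inl rfl, pvOptLt_irrefl _, by simp⟩
  | cons y ys ih =>
    intro x
    simp only [List.foldl_cons]
    obtain ⟨hmem, hx', hall⟩ := ih (if pvOptLt y.2 x.2 then y else x)
    by_cases hlt : pvOptLt y.2 x.2 = true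
    · rw [if_pos hlt] at *
      refine ⟨?_, ?_, ?_⟩
      · rcases hmem with h | h
        · right; rw [h]; exact List.mem_cons_self ..
        · right; exact List.mem_cons_of_mem _ h
      · -- ¬ lt x r : lt y x, ¬ lt y r ⇒ ¬ lt x r? need: lt x r → lt y r via trans
        cases hxr : pvOptLt x.2 ((ys.foldl _ y).2) with
        | false => rfl
        | true =>
          exfalso
          have : pvOptLt y.2 ((ys.foldl (fun best y => if pvOptLt y.2 best.2 then y else best) y).2) = true := by
            cases y2 : y.2 <;> cases x2 : x.2 <;> cases r2 : (ys.foldl (fun best y => if pvOptLt y.2 best.2 then y else best) y).2 <;>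
              simp_all [pvOptLt] <;> omega
          rw [hx'] at this; exact Bool.false_ne_true this
      · intro z hz
        rcases List.mem_cons.mp hz with h | h
        · rw [h]; exact hx'
        · exact hall z h
    · rw [if_neg hlt] at *
      have hyx : pvOptLt y.2 x.2 = false := Bool.eq_false_iff.mpr hlt
      refine ⟨?_, hx', ?_⟩
      · rcases hmem with h | h
        · left; exact h
        · right; exact List.mem_cons_of_mem _ h
      · intro z hz
        rcases List.mem_cons.mp hz with h | h
        · rw [h]; exact pvOptLt_neg_trans hyx hx'
        · exact hall z h

lemma pyMin_spec (l : List (String × Option Int)) (hl : l ≠ []) :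
    pyMinBySteps l ∈ l ∧ ∀ y ∈ l, pvOptLt y.2 (pyMinBySteps l).2 = false := by
  cases l with
  | nil => exact absurd rfl hl
  | cons x xs =>
    obtain ⟨hmem, hx, hall⟩ := pvFold_spec xs x
    rw [pyMinBySteps]
    refine ⟨?_, ?_⟩
    · rcases hmem with h | h
      · rw [h]; exact List.mem_cons_self ..
      · exact List.mem_cons_of_mem _ h
    · intro y hy
      rcases List.mem_cons.mp hy with h | h
      · rw [h]; exact hx
      · exact hall y h


lemma pvMinVal (ins : List Char) (g : PySem.Dict String (PySem.Dict String String))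
    (hins : ins ≠ [])
    (hclo : ∀ p ∈ g.items, ∀ c ∈ ins, ((p.2.get? (String.singleton c)).any (fun v => g.contains v)) = true)
    (s : String) (hs : s ∈ g.keys)
    (hexZ : ∃ n, PySem.Str.endswith (pvSt ins g s n).1 "Z" = true) :
    (pyMinBySteps ((g.keys.filter (fun node => PySem.Str.endswith node "Z")).map
      (fun e => (e, count_steps ins g s e)))).2 = some ((Nat.find hexZ : Nat) : Int) := by
  set N := Nat.find hexZ with hNdef
  set eStar := (pvSt ins g s N).1 with hestar
  have heZ : PySem.Str.endswith eStar "Z" = true := Nat.find_spec hexZ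
  have heK : eStar ∈ g.keys := pvSt_fst_mem ins g hins hclo s hs N
  have heEnds : eStar ∈ g.keys.filter (fun node => PySem.Str.endswith node "Z") :=
    List.mem_filter.mpr ⟨heK, heZ⟩
  have hexE : ∃ n, (pvSt ins g s n).1 = eStar := ⟨N, rfl⟩
  have hfindE : Nat.find hexE = N := by
    apply le_antisymm (Nat.find_min' hexE rfl)
    have : PySem.Str.endswith (pvSt ins g s (Nat.find hexE)).1 "Z" = true := by
      rw [Nat.find_spec hexE]; exact heZ
    exact Nat.find_min' hexZ this
  have hcntE : count_steps ins g s eStar = some ((N : Nat) : Int) := by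
    rw [count_steps_some ins g hins hclo s hs eStar hexE, hfindE]
  set l := (g.keys.filter (fun node => PySem.Str.endswith node "Z")).map
      (fun e => (e, count_steps ins g s e)) with hldef
  have hEmem : (eStar, count_steps ins g s eStar) ∈ l := List.mem_map_of_mem heEnds
  have hlne : l ≠ [] := List.ne_nil_of_mem hEmem
  obtain ⟨hrmem, hrall⟩ := pyMin_spec l hlne
  have hNotLt : pvOptLt (some ((N : Nat) : Int)) (pyMinBySteps l).2 = false := by
    have := hrall _ hEmem
    rwa [show (eStar, count_steps ins g s eStar).2 = some ((N : Nat) : Int) from hcntE] at this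
  obtain ⟨e, heMem, hre⟩ := List.mem_map.mp hrmem
  have heZ' : PySem.Str.endswith e "Z" = true := (List.mem_filter.mp heMem).2
  by_cases hexe : ∃ n, (pvSt ins g s n).1 = e
  · have hcnt := count_steps_some ins g hins hclo s hs e hexe
    have hNle : N ≤ Nat.find hexe := by
      apply Nat.find_min' hexZ
      rw [Nat.find_spec hexe]; exact heZ'
    have hr2 : (pyMinBySteps l).2 = some ((Nat.find hexe : Nat) : Int) := by
      rw [← hre]; exact hcnt
    rw [hr2] at hNotLt ⊢
    have : ¬ ((N : Int) < (Nat.find hexe : Int)) := by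
      simpa [pvOptLt] using hNotLt
    have : Nat.find hexe = N := by omega
    rw [this]
  · have hcnt := count_steps_none ins g hins hclo s hs e (by exact not_exists.mp hexe)
    have hr2 : (pyMinBySteps l).2 = none := by rw [← hre]; exact hcnt
    rw [hr2] at hNotLt
    simp [pvOptLt] at hNotLt

lemma pvNestedFoldl {α β δ : Type} (l1 : List α) (l2 : List β) {γ : Type}
    (G : α → β → γ) (F : δ → γ → δ) (init : δ) :
    l1.foldl (fun d a => l2.foldl (fun d b => F d (G a b)) d) init
      = (l1.flatMap (fun a => l2.map (G a))).foldl F init := by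
  induction l1 generalizing init with
  | nil => rfl
  | cons a l1 ih => simp only [List.foldl_cons, List.flatMap_cons, List.foldl_append, List.foldl_map, ih]

lemma pvOfListReplicate {α : Type} [BEq α] [LawfulBEq α] (s : α) (n : Nat) (hn : 0 < n) :
    PySem.Set.ofList (List.replicate n s) = [s] := by
  induction n with
  | zero => omega
  | succ n ih =>
    rw [List.replicate_succ, PySem.Set.ofList_cons]
    cases n with
    | zero => simp [PySem.Set.ofList_nil, PySem.Set.discard]
    | succ n =>
      rw [ih (Nat.succ_pos n)]
      simp [PySem.Set.discard]

lemma pvOfListBlocks (starts : List String) (n : Nat) (hn : 0 < n) (hnd : starts.Nodup) :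
    PySem.Set.ofList (starts.flatMap (fun s => List.replicate n s)) = starts := by
  induction starts with
  | nil => rfl
  | cons s rest ih =>
    rw [List.flatMap_cons, PySem.Set.ofList_append, pvOfListReplicate s n hn,
      PySem.Set.update_eq_append_filter, ih (List.nodup_cons.mp hnd).2]
    have hs : s ∉ rest := (List.nodup_cons.mp hnd).1
    have : rest.filter (fun y => !(PySem.Set.contains [s] y)) = rest := by
      apply List.filter_eq_self.mpr
      intro y hy
      have : y ≠ s := fun h => hs (h ▸ hy)
      simp [PySem.Set.contains, this]
    rw [this]
    rfl

lemma pvBlocksFilter {α : Type} (starts : List String) (es : List String)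
    (c : String → String → α) (s : String) (hnd : starts.Nodup) (hs : s ∈ starts) :
    ((starts.flatMap (fun s' => es.map (fun e => (s', c s' e)))).filter
      (fun p => p.1 == s)).map (fun x => x.2) = es.map (fun e => c s e) := by
  induction starts with
  | nil => cases hs
  | cons s' rest ih =>
    rw [List.flatMap_cons, List.filter_append, List.map_append]
    obtain ⟨hnd1, hnd2⟩ := List.nodup_cons.mp hnd
    by_cases h : s' = s
    · subst h
      have h1 : (es.map (fun e => (s', c s' e))).filter (fun p => p.1 == s') = es.map (fun e => (s', c s' e)) := by
        apply List.filter_eq_self.mpr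
        intro p hp
        obtain ⟨e, _, he⟩ := List.mem_map.mp hp
        rw [← he]; simp
      have h2 : (rest.flatMap (fun s'' => es.map (fun e => (s'', c s'' e)))).filter (fun p => p.1 == s') = [] := by
        apply List.filter_eq_nil_iff.mpr
        intro p hp
        obtain ⟨s'', hs'', hp2⟩ := List.mem_flatMap.mp hp
        obtain ⟨e, _, he⟩ := List.mem_map.mp hp2
        rw [← he]
        intro hc
        exact hnd1 ((eq_of_beq hc) ▸ hs'')
      rw [h1, h2, List.map_nil, List.append_nil, List.map_map]
      rfl
    · have hsrest : s ∈ rest := by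
        rcases List.mem_cons.mp hs with h' | h'
        · exact absurd h'.symm h
        · exact h'
      have h1 : (es.map (fun e => (s', c s' e))).filter (fun p => p.1 == s) = [] := by
        apply List.filter_eq_nil_iff.mpr
        intro p hp
        obtain ⟨e, _, he⟩ := List.mem_map.mp hp
        rw [← he]
        simpa using h
      rw [h1, List.map_nil, List.nil_append]
      exact ih hnd2 hsrest


lemma pvMain (ins : List Char) (g : PySem.Dict String (PySem.Dict String String))
    (hnd : g.keys.Nodup)
    (hpre : (g.keys.filter (fun node => PySem.Str.endswith node "A")) = [] ∨
      (ins ≠ [] ∧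
       (∀ p ∈ g.items, ∀ c ∈ ins, ((p.2.get? (String.singleton c)).any (fun v => g.contains v)) = true) ∧
       (∀ s ∈ g.keys.filter (fun node => PySem.Str.endswith node "A"),
          ∃ n ∈ List.range (g.keys.length * ins.length + 1),
            PySem.Str.endswith ((pvStep ins g)^[n] (s, 0)).1 "Z" = true))) :
    ((((g.keys.filter (fun node => PySem.Str.endswith node "A")).foldl (fun d start =>
        (g.keys.filter (fun node => PySem.Str.endswith node "Z")).foldl (fun d e =>
          d.modify start [] (fun l => l ++ [(e, count_steps ins g start e)])) d) PySem.Dict.empty).values.foldl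
        (fun acc l => acc ++ [pyMinBySteps l]) []).map (fun x => x.2)).foldl
        (fun acc v => ((Int.lcm acc (v.getD 0) : Nat) : Int)) 1
      = g.keys.foldl (fun result start =>
          if PySem.Str.endswith start "A" then
            ((Int.lcm result ((walkLoop ins g (g.size * ins.length + 2) start 0 0 PySem.Set.empty).getD 1) : Nat) : Int)
          else result) 1 := by
  classical
  set startNodes := g.keys.filter (fun node => PySem.Str.endswith node "A") with hSdef
  set endNodes := g.keys.filter (fun node => PySem.Str.endswith node "Z") with hEdef
  -- B side: the guarded fold is a fold over the filtered list
  rw [PySem.List.foldl_if_eq_foldl_filter (fun node => PySem.Str.endswith node "A")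
      (fun result start =>
        ((Int.lcm result ((walkLoop ins g (g.size * ins.length + 2) start 0 0 PySem.Set.empty).getD 1) : Nat) : Int))
      g.keys 1, ← hSdef]
  -- A side: flatten the nested dict-building fold
  rw [show (List.foldl (fun d start => List.foldl (fun d e =>
        d.modify start [] fun l => l ++ [(e, count_steps ins g start e)]) d endNodes)
        PySem.Dict.empty startNodes)
      = (startNodes.flatMap (fun s => endNodes.map (fun e => (s, (e, count_steps ins g s e))))).foldl
          (fun d p => d.modify p.1 [] (fun l => l ++ [p.2])) PySem.Dict.empty
    from pvNestedFoldl startNodes endNodes (fun s e => (s, (e, count_steps ins g s e)))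
      (fun d p => d.modify p.1 [] (fun l => l ++ [p.2])) PySem.Dict.empty]
  by_cases hS : startNodes = []
  · rw [hS]
    simp [PySem.Dict.values, PySem.Dict.empty]
  · obtain ⟨hins, hclo, hreach⟩ := hpre.resolve_left hS
    have hSnd : startNodes.Nodup := List.Nodup.filter _ hnd
    have hEne : endNodes ≠ [] := by
      obtain ⟨s0, hs0⟩ := List.exists_mem_of_ne_nil _ hS
      obtain ⟨n, _, hZ⟩ := hreach s0 hs0
      have hs0K : s0 ∈ g.keys := (List.mem_filter.mp hs0).1
      have : ((pvStep ins g)^[n] (s0, 0)).1 ∈ endNodes :=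
        List.mem_filter.mpr ⟨pvSt_fst_mem ins g hins hclo s0 hs0K n, hZ⟩
      exact List.ne_nil_of_mem this
    have hEpos : 0 < endNodes.length := List.length_pos_of_ne_nil hEne
    set P := startNodes.flatMap (fun s => endNodes.map (fun e => (s, (e, count_steps ins g s e)))) with hPdef
    set d := P.foldl (fun d p => d.modify p.1 [] (fun l => l ++ [p.2])) PySem.Dict.empty with hddef
    have hkeys : d.keys = startNodes := by
      rw [hddef, PySem.Dict.keys_foldl_modify_key P (fun x => x.1) []
          (fun d x => (fun l => l ++ [x.2])) PySem.Dict.empty, PySem.Dict.keys_empty,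
        PySem.Set.update_nil_left]
      have hmap : P.map (fun x => x.1) = startNodes.flatMap (fun s => List.replicate endNodes.length s) := by
        rw [hPdef, List.map_flatMap]
        simp [List.map_map, Function.comp_def, List.map_const']
      rw [hmap]
      exact pvOfListBlocks startNodes endNodes.length hEpos hSnd
    have hdnd : d.keys.Nodup := by rw [hkeys]; exact hSnd
    have hvals : d.values = startNodes.map (fun k => d.getD k []) := by
      rw [PySem.Dict.values_eq_map_keys d hdnd [], hkeys]
    have hgetD : ∀ s ∈ startNodes, d.getD s [] =
        endNodes.map (fun e => (e, count_steps ins g s e)) := by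
      intro s hs
      rw [hddef, PySem.Dict.getD_foldl_modify_append P PySem.Dict.empty s, PySem.Dict.getD_empty,
        List.nil_append, hPdef]
      exact pvBlocksFilter startNodes endNodes (fun s e => (e, count_steps ins g s e)) s hSnd hs
    rw [hvals, PySem.List.foldl_append_singleton_eq_map, List.nil_append]
    simp only [List.map_map, List.foldl_map]
    apply PySem.List.foldl_congr_mem
    intro acc s hs
    have hsK : s ∈ g.keys := (List.mem_filter.mp hs).1
    have hexZ : ∃ n, PySem.Str.endswith (pvSt ins g s n).1 "Z" = true := by
      obtain ⟨n, _, hZ⟩ := hreach s hs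
      exact ⟨n, hZ⟩
    have hmin := pvMinVal ins g hins hclo s hsK hexZ
    rw [← hEdef] at hmin
    have hwalk := walk_some ins g hins hclo s hsK hexZ
    simp only [Function.comp_def]
    rw [hgetD s hs, hmin, hwalk]
    rfl
-- ===== VERDICT (by name: the statement is the Claim_ definition above) =====
theorem count_simultaneous_steps_spec : Claim_equal_count_simultaneous_steps := by
  intro instructions graph _hdom hpre
  unfold Pre_count_simultaneous_steps at hpre
  unfold Spec_count_simultaneous_steps count_simultaneous_steps count_simultaneous_steps_alt
  exact pvMain instructions.toList (pvGraph graph) (PySem.Dict.nodup_keys_ofList _) hpre
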